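-- pv_equiv track=rewrite | github.com/DatTrannn/CP1404 | Prac_09/cleanup_files.py | get_fixed_filename
-- ===== SOURCE A (Python) =====
-- def get_fixed_filename(filename):
--     """Return a 'fixed' version of filename."""
--     filename = filename.replace(" ", "_").replace(".TXT", ".txt")
--     new_name = ""
--     for i, char in enumerate(filename):
--         if char.isupper() and filename[i - 1:i].islower():
--             new_name += f'_{char}'
--         elif filename[i - 1:i] == ' ':
--             new_name += ''
--         elif (filename[i - 1:i] == '_' or filename[i - 1:i] == '(') and char.islower():
--             new_name += char.upper()
--         else:
--             new_name += char
--     return new_name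
-- ===== SOURCE B (Python) =====
-- def get_fixed_filename(filename):
--     """Return a 'fixed' version of filename."""
--     s = filename.replace(" ", "_").replace(".TXT", ".txt")
--     # pass 1: insert '_' before an uppercase letter that follows a lowercase letter
--     t = "".join("_" + c if c.isupper() and p.islower() else c
--                 for p, c in zip("\x00" + s, s))
--     # pass 2: capitalize a lowercase letter that follows '_' or '('
--     return "".join(c.upper() if p in "_(" and c.islower() else c
--                    for p, c in zip("\x00" + t, t))
-- ===== Notes on version B (the rewrite author's own statement) =====
-- stated objective: idiomatic
-- what changed: Replaces the single indexed loop with its four-way branch on the prev-slice by two independent sequential passes over adjacent character pairs: the first pass inserts an underscore before an uppercase letter that follows a lowercase letter, the second uppercases a lowercase letter that follows an underscore or opening parenthesis (the space branch is dead after the replaces).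
import Mathlib
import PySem

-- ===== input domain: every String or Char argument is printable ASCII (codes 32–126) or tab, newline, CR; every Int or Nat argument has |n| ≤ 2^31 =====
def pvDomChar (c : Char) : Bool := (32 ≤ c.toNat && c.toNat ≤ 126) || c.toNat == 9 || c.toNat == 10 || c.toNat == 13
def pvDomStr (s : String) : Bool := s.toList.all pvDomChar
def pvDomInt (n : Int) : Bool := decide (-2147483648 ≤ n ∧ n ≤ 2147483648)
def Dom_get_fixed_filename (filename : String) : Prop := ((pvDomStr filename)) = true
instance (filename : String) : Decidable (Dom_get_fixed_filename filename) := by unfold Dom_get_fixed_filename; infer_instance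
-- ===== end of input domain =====

-- B replaces A's single indexed loop with its four-way branch on the slice filename[i-1:i] by two
-- independent sequential passes over (prev, char) pairs; same O(n) cost, idiomatic decomposition.

-- ===== PORT A =====
-- s.islower() for the ≤1-char slices filename[i-1:i] that A takes: a 1-char string is lower iff its
-- char is; '' is not lower (exact for those shapes on the ASCII domain)
def pvIslower1 (s : List Char) : Bool :=
  match s with
  | [c] => PySem.Chars.islower c
  | _ => false

def get_fixed_filename (filename : String) : String :=
  let cs := (PySem.Str.replace (PySem.Str.replace filename " " "_") ".TXT" ".txt").toList
  let new_name := (PySem.List.enumerate cs 0).foldl (fun acc ic =>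
    let prev := PySem.List.slice cs (some (ic.1 - 1)) (some ic.1)
    if PySem.Chars.isupper ic.2 && pvIslower1 prev then acc ++ ['_', ic.2]
    else if prev == [' '] then acc
    else if (prev == ['_'] || prev == ['(']) && PySem.Chars.islower ic.2 then
      acc ++ [PySem.Chars.upperChar ic.2]
    else acc ++ [ic.2]) ([] : List Char)
  String.mk new_name

-- ===== PORT B =====
def get_fixed_filename_alt (filename : String) : String :=
  let s := (PySem.Str.replace (PySem.Str.replace filename " " "_") ".TXT" ".txt").toList
  -- pass 1: insert '_' before an uppercase letter that follows a lowercase letter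
  let t := ((Char.ofNat 0 :: s).zip s).flatMap (fun pc =>
    if PySem.Chars.isupper pc.2 && PySem.Chars.islower pc.1 then ['_', pc.2] else [pc.2])
  -- pass 2: capitalize a lowercase letter that follows '_' or '('
  let u := ((Char.ofNat 0 :: t).zip t).map (fun pc =>
    if (pc.1 == '_' || pc.1 == '(') && PySem.Chars.islower pc.2 then PySem.Chars.upperChar pc.2
    else pc.2)
  String.mk u

-- ===== PRECONDITION & SPEC =====
def Spec_get_fixed_filename (filename : String) (out : String) : Prop := out = get_fixed_filename_alt filename
instance (filename : String) (out : String) : Decidable (Spec_get_fixed_filename filename out) := by unfold Spec_get_fixed_filename; infer_instance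

-- ===== CLAIM (what is proved, stated in full; the proofs are below) =====
def Claim_equal_get_fixed_filename : Prop := ∀ (filename : String), Dom_get_fixed_filename filename → Spec_get_fixed_filename filename (get_fixed_filename filename)

-- ===== LEMMAS AND PROOFS =====

-- the common per-position step, prev as a char (Char.ofNat 0 plays Python's empty slice at i = 0)
def stepA (p c : Char) : List Char :=
  if PySem.Chars.isupper c && PySem.Chars.islower p then ['_', c]
  else if p == ' ' then []
  else if (p == '_' || p == '(') && PySem.Chars.islower c then [PySem.Chars.upperChar c]
  else [c]

def goA : Char → List Char → List Char
  | _, [] => []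
  | p, c :: rest => stepA p c ++ goA c rest

-- A's loop body as a pure list contribution
def gA (cs : List Char) (ic : Int × Char) : List Char :=
  let prev := PySem.List.slice cs (some (ic.1 - 1)) (some ic.1)
  if PySem.Chars.isupper ic.2 && pvIslower1 prev then ['_', ic.2]
  else if prev == [' '] then []
  else if (prev == ['_'] || prev == ['(']) && PySem.Chars.islower ic.2 then
    [PySem.Chars.upperChar ic.2]
  else [ic.2]

-- B's two passes, prev threaded explicitly
def pass1 (p : Char) (l : List Char) : List Char :=
  ((p :: l).zip l).flatMap (fun pc =>
    if PySem.Chars.isupper pc.2 && PySem.Chars.islower pc.1 then ['_', pc.2] else [pc.2])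

def pass2 (p : Char) (l : List Char) : List Char :=
  ((p :: l).zip l).map (fun pc =>
    if (pc.1 == '_' || pc.1 == '(') && PySem.Chars.islower pc.2 then PySem.Chars.upperChar pc.2
    else pc.2)

lemma upper_not_lower (c : Char) (h : PySem.Chars.isupper c = true) :
    PySem.Chars.islower c = false := by
  simp only [PySem.Chars.isupper, Bool.and_eq_true, decide_eq_true_eq] at h
  have hlt : c < 'a' := lt_of_le_of_lt h.2 (by decide)
  simp only [PySem.Chars.islower, Bool.and_eq_false_iff, decide_eq_false_iff_not, not_le]
  exact Or.inl hlt

lemma pass1_cons (p c : Char) (rest : List Char) :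
    pass1 p (c :: rest) =
      (if PySem.Chars.isupper c && PySem.Chars.islower p then ['_', c] else [c]) ++ pass1 c rest := by
  simp [pass1]

lemma pass2_cons (p c : Char) (rest : List Char) :
    pass2 p (c :: rest) =
      (if (p == '_' || p == '(') && PySem.Chars.islower c then PySem.Chars.upperChar c else c)
        :: pass2 c rest := by
  simp [pass2]

lemma passes_eq_goA : ∀ (s : List Char) (p : Char), p ≠ ' ' → ' ' ∉ s →
    pass2 p (pass1 p s) = goA p s := by
  intro s
  induction s with
  | nil => intro p _ _; simp [pass1, pass2, goA]
  | cons c rest ih =>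
    intro p hp hs
    have hc : c ≠ ' ' := fun h => hs (by simp [h])
    have hrest : ' ' ∉ rest := fun h => hs (by simp [h])
    rw [pass1_cons]
    by_cases hb : (PySem.Chars.isupper c && PySem.Chars.islower p) = true
    · rw [if_pos hb]
      have hcl : PySem.Chars.islower c = false :=
        upper_not_lower c (by exact (Bool.and_eq_true _ _).mp hb |>.1)
      rw [show (['_', c] ++ pass1 c rest) = '_' :: c :: pass1 c rest by rfl]
      rw [pass2_cons, pass2_cons]
      rw [goA, stepA, if_pos hb]
      simp only [hcl, Bool.and_false]
      have : PySem.Chars.islower '_' = false := by decide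
      simp only [this, Bool.and_false, Bool.false_eq_true, if_false]
      rw [ih c hc hrest]
      rfl
    · rw [if_neg hb]
      rw [show ([c] ++ pass1 c rest) = c :: pass1 c rest by rfl]
      rw [pass2_cons, goA, stepA, if_neg hb]
      rw [if_neg (by simp [hp] : ¬ (p == ' ') = true)]
      rw [ih c hc hrest]
      by_cases h3 : ((p == '_' || p == '(') && PySem.Chars.islower c) = true
      · rw [if_pos h3, if_pos h3]; rfl
      · rw [if_neg h3, if_neg h3]; rfl

-- the prev slice filename[i-1:i] is [] at i = 0 and the singleton previous char otherwise
lemma slice_prev (cs : List Char) (i : Nat) (h : i < cs.length) :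
    PySem.List.slice cs (some ((i : Int) - 1)) (some (i : Int)) =
      if _ : i = 0 then [] else [cs[i - 1]'(by omega)] := by
  cases i with
  | zero =>
    simp only [Nat.cast_zero, zero_sub]
    rw [dif_pos trivial]
    apply List.eq_nil_of_length_eq_zero
    rw [PySem.List.length_slice]
    unfold PySem.List.clampIdx
    split_ifs <;> omega
  | succ n =>
    have hn : n < cs.length := by omega
    have hcast : ((n + 1 : Nat) : Int) - 1 = ((n : Nat) : Int) := by push_cast; ring
    have htake : List.take 1 (List.drop n cs) = [cs[n]'hn] := by
      rw [List.drop_eq_getElem_cons hn, List.take_succ_cons, List.take_zero]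
    rw [hcast, PySem.List.slice_natCast, show n + 1 - n = 1 from by omega, htake,
      dif_neg (by omega : ¬ n + 1 = 0)]
    simp

lemma enum_eq_goA (cs : List Char) :
    ∀ (m k : Nat) (p : Char), cs.length - k = m → (hk : k ≤ cs.length) →
    (k = 0 → p = Char.ofNat 0) → (∀ _ : 0 < k, p = cs[k - 1]'(by omega)) →
    (PySem.List.enumerate (cs.drop k) (k : Int)).flatMap (gA cs) = goA p (cs.drop k) := by
  intro m
  induction m with
  | zero =>
    intro k p hm hk _ _
    have : cs.drop k = [] := List.drop_eq_nil_of_le (by omega)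
    simp [this, goA]
  | succ m ih =>
    intro k p hm hk h0 hpos
    have hklt : k < cs.length := by omega
    rw [List.drop_eq_getElem_cons hklt, PySem.List.enumerate_cons, List.flatMap_cons, goA]
    have hstep : gA cs ((k : Int), cs[k]) = stepA p cs[k] := by
      unfold gA stepA
      simp only
      rw [slice_prev cs k hklt]
      by_cases hz : k = 0
      · rw [dif_pos hz, h0 hz]
        have h1 : PySem.Chars.islower (Char.ofNat 0) = false := by decide
        have h2 : (Char.ofNat 0 == ' ') = false := by decide
        have h3 : (Char.ofNat 0 == '_') = false := by decide
        have h4 : (Char.ofNat 0 == '(') = false := by decide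
        simp [pvIslower1, h1, h2, h3, h4]
      · rw [dif_neg hz, hpos (by omega)]
        simp [pvIslower1]
    rw [hstep]
    have hnext : (PySem.List.enumerate (cs.drop (k + 1)) ((k : Int) + 1)).flatMap (gA cs)
        = goA cs[k] (cs.drop (k + 1)) := by
      have := ih (k + 1) (cs[k]'hklt) (by omega) (by omega) (by omega)
        (fun _ => by simp)
      rw [← this]
      norm_num
    rw [hnext]

-- no ' ' survives the replaces: the two go-invariants
lemma go_no_single (c : Char) (new : List Char) (hnew : c ∉ new) :
    ∀ (fuel : Nat) (l acc : List Char), l.length ≤ fuel → c ∉ acc →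
      c ∉ PySem.Chars.replace.go [c] new fuel l acc := by
  intro fuel
  induction fuel with
  | zero =>
    intro l acc hl hacc
    have : l = [] := List.eq_nil_of_length_eq_zero (by omega)
    subst this
    simpa [PySem.Chars.replace.go] using hacc
  | succ f ih =>
    intro l acc hl hacc
    cases l with
    | nil => simpa [PySem.Chars.replace.go] using hacc
    | cons c' t =>
      by_cases hcc : c = c'
      · subst hcc
        have hpre : ([c].isPrefixOf (c :: t)) = true := by simp [List.isPrefixOf]
        simp only [PySem.Chars.replace.go, hpre, if_true]
        exact ih _ _ (by simp at hl ⊢; omega) (by simp [hacc, hnew])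
      · have hpre : ([c].isPrefixOf (c' :: t)) = false := by
          simpa [List.isPrefixOf] using hcc
        simp only [PySem.Chars.replace.go, hpre, Bool.false_eq_true, if_false]
        exact ih _ _ (by simp at hl ⊢; omega) (by simp [hacc, hcc])

lemma go_preserve (old new : List Char) (c : Char) (hnew : c ∉ new) :
    ∀ (fuel : Nat) (l acc : List Char), c ∉ l → c ∉ acc →
      c ∉ PySem.Chars.replace.go old new fuel l acc := by
  intro fuel
  induction fuel with
  | zero =>
    intro l acc hl hacc
    simp only [PySem.Chars.replace.go, List.mem_append, List.mem_reverse]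
    rintro (h | h)
    · exact hacc h
    · exact hl h
  | succ f ih =>
    intro l acc hl hacc
    cases l with
    | nil => simpa [PySem.Chars.replace.go] using hacc
    | cons c' t =>
      by_cases hpre : (old.isPrefixOf (c' :: t)) = true
      · simp only [PySem.Chars.replace.go, hpre, if_true]
        exact ih _ _ (fun h => hl (List.mem_of_mem_drop h)) (by
          simp only [List.mem_append, List.mem_reverse]
          rintro (h | h); exact hnew h; exact hacc h)
      · simp only [PySem.Chars.replace.go, eq_false_of_ne_true hpre, Bool.false_eq_true, if_false]
        exact ih _ _ (fun h => hl (List.mem_cons_of_mem _ h)) (by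
          intro h
          rcases List.mem_cons.mp h with h | h
          · exact hl (h ▸ List.mem_cons_self ..)
          · exact hacc h)

lemma no_space (f : String) :
    ' ' ∉ (PySem.Str.replace (PySem.Str.replace f " " "_") ".TXT" ".txt").toList := by
  have h1 : ' ' ∉ (PySem.Str.replace f " " "_").toList := by
    rw [PySem.Str.toList_replace]
    show ' ' ∉ PySem.Chars.replace f.toList [' '] ['_']
    unfold PySem.Chars.replace
    rw [if_neg (by decide)]
    exact go_no_single ' ' ['_'] (by decide) _ _ _ (le_refl _) (by simp)
  rw [PySem.Str.toList_replace]
  show ' ' ∉ PySem.Chars.replace (PySem.Str.replace f " " "_").toList ['.','T','X','T'] ['.','t','x','t']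
  unfold PySem.Chars.replace
  rw [if_neg (by decide)]
  exact go_preserve _ _ ' ' (by decide) _ _ _ h1 (by simp)

lemma main_lists (cs : List Char) (h : ' ' ∉ cs) :
    (PySem.List.enumerate cs 0).foldl (fun acc ic =>
      let prev := PySem.List.slice cs (some (ic.1 - 1)) (some ic.1)
      if PySem.Chars.isupper ic.2 && pvIslower1 prev then acc ++ ['_', ic.2]
      else if prev == [' '] then acc
      else if (prev == ['_'] || prev == ['(']) && PySem.Chars.islower ic.2 then
        acc ++ [PySem.Chars.upperChar ic.2]
      else acc ++ [ic.2]) ([] : List Char)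
    = pass2 (Char.ofNat 0) (pass1 (Char.ofNat 0) cs) := by
  have hbody : (fun (acc : List Char) (ic : Int × Char) =>
      let prev := PySem.List.slice cs (some (ic.1 - 1)) (some ic.1)
      if PySem.Chars.isupper ic.2 && pvIslower1 prev then acc ++ ['_', ic.2]
      else if prev == [' '] then acc
      else if (prev == ['_'] || prev == ['(']) && PySem.Chars.islower ic.2 then
        acc ++ [PySem.Chars.upperChar ic.2]
      else acc ++ [ic.2]) = fun acc ic => acc ++ gA cs ic := by
    funext acc ic
    simp only [gA]
    split_ifs <;> simp
  rw [hbody, PySem.List.foldl_append_eq_flatMap, List.nil_append]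
  have hA := enum_eq_goA cs cs.length 0 (Char.ofNat 0) (by omega) (by omega)
    (fun _ => rfl) (fun hpos => absurd hpos (by omega))
  simp only [List.drop_zero, Nat.cast_zero] at hA
  rw [passes_eq_goA cs (Char.ofNat 0) (by decide) h, ← hA]

-- ===== VERDICT (by name: the statement is the Claim_ definition above) =====
theorem get_fixed_filename_spec : Claim_equal_get_fixed_filename := by
  intro f _
  show get_fixed_filename f = get_fixed_filename_alt f
  exact congrArg String.mk
    (main_lists ((PySem.Str.replace (PySem.Str.replace f " " "_") ".TXT" ".txt").toList)
      (no_space f))
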